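-- pv_equiv track=rewrite | github.com/AJBats/saturn-daytona-usa-re | workstreams/driving_model/parse_consumers.py | sort_offsets
-- ===== SOURCE A (Python) =====
-- def sort_offsets(offsets):
--     """Sort offsets: numeric first (by value), then symbolic."""
--     numeric = []
--     symbolic = []
--     for o in offsets:
--         if o.startswith("0x"):
--             try:
--                 numeric.append((int(o, 16), o))
--             except ValueError:
--                 symbolic.append(o)
--         else:
--             symbolic.append(o)
--     numeric.sort()
--     symbolic.sort()
--     return [o for _, o in numeric] + symbolic
-- ===== SOURCE B (Python) =====
-- def sort_offsets(offsets):
--     """Sort offsets: numeric first (by value), then symbolic — one keyed sort."""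
--     def key(o):
--         if o.startswith("0x"):
--             try:
--                 return (0, int(o, 16), o)
--             except ValueError:
--                 pass
--         return (1, 0, o)
--     return sorted(offsets, key=key)
-- ===== Notes on version B (the rewrite author's own statement) =====
-- stated objective: simpler
-- what changed: Replaced A's partition into numeric/symbolic lists followed by two separate sorts and a concatenation with a single sorted(offsets, key=f) call, where f tags each offset (0, int(o,16), o) for parseable 0x-strings and (1, 0, o) otherwise.
import Mathlib
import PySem

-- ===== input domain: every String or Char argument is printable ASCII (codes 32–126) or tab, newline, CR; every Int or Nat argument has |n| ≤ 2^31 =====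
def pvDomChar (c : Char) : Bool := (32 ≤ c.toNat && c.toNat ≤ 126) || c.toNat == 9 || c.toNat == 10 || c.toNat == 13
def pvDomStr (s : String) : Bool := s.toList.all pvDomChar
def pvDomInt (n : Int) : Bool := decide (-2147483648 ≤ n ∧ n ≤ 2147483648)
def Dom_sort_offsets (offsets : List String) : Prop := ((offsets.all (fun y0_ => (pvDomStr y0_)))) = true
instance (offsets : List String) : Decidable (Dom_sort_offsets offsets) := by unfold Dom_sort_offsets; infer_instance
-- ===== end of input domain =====

-- B replaces A's partition-into-two-lists + two sorts + concatenation by a single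
-- keyed sort with a three-component tuple key (objective: simpler, same O(n log n) cost).

-- ===== PORT A =====
-- A's loop partitions into (numeric pairs, symbolic strings); then two sorts and a concat.
def sort_offsets (offsets : List String) : List String :=
  let st := offsets.foldl
    (fun (st : List (Int × String) × List String) o =>
      if PySem.Str.startswith o "0x" then
        match PySem.Int.ofStrBase? o 16 with          -- int(o, 16); none = ValueError
        | some v => (st.1 ++ [(v, o)], st.2)
        | none   => (st.1, st.2 ++ [o])
      else (st.1, st.2 ++ [o]))
    ([], [])
  (PySem.List.sorted2 st.1 Prod.fst Prod.snd).map (fun p => p.2)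
    ++ PySem.List.sorted st.2 (fun x => x) false

-- ===== PORT B =====
-- B's key function returns the tuple (t, v, o): (0, int(o,16), o) for parseable "0x…",
-- (1, 0, o) otherwise.  Python's tuple comparison is lexicographic, so the 3-tuple key is
-- sorted2 with first key the lexicographic pair (t, v) and second key o.
def pvTag (o : String) : Lex (Int × Int) :=
  if PySem.Str.startswith o "0x" then
    match PySem.Int.ofStrBase? o 16 with
    | some v => toLex (0, v)
    | none   => toLex (1, 0)
  else toLex (1, 0)

def sort_offsets_alt (offsets : List String) : List String :=
  PySem.List.sorted2 offsets pvTag (fun o => o) false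

-- ===== PRECONDITION & SPEC =====
def Spec_sort_offsets (offsets : List String) (out : List String) : Prop := out = sort_offsets_alt offsets
instance (offsets : List String) (out : List String) : Decidable (Spec_sort_offsets offsets out) := by unfold Spec_sort_offsets; infer_instance

-- ===== CLAIM (what is proved, stated in full; the proofs are below) =====
def Claim_equal_sort_offsets : Prop := ∀ (offsets : List String), Dom_sort_offsets offsets → Spec_sort_offsets offsets (sort_offsets offsets)

-- ===== LEMMAS AND PROOFS =====

-- "o is a numeric offset": starts with "0x" and int(o,16) succeeds
def pvIsNum (o : String) : Bool :=
  PySem.Str.startswith o "0x" && (PySem.Int.ofStrBase? o 16).isSome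

lemma pvTag_num {o : String} {v : Int}
    (hs : PySem.Str.startswith o "0x" = true)
    (hv : PySem.Int.ofStrBase? o 16 = some v) :
    pvTag o = toLex (0, v) := by
  simp [pvTag, hs, hv, -PySem.Str.startswith_eq]

lemma pvTag_sym {o : String} (h : pvIsNum o = false) :
    pvTag o = toLex (1, 0) := by
  unfold pvTag
  cases hs : PySem.Str.startswith o "0x" with
  | false => simp [hs, -PySem.Str.startswith_eq]
  | true =>
    cases hv : PySem.Int.ofStrBase? o 16 with
    | none => simp [hs, hv, -PySem.Str.startswith_eq]
    | some v => simp [pvIsNum, hs, hv, -PySem.Str.startswith_eq] at h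

-- A's loop is a partition: numeric pairs (in order) and symbolic strings (in order).
lemma pvPartition (offsets : List String)
    (a : List (Int × String)) (b : List String) :
    offsets.foldl
      (fun (st : List (Int × String) × List String) o =>
        if PySem.Str.startswith o "0x" then
          match PySem.Int.ofStrBase? o 16 with
          | some v => (st.1 ++ [(v, o)], st.2)
          | none   => (st.1, st.2 ++ [o])
        else (st.1, st.2 ++ [o]))
      (a, b)
    = (a ++ (offsets.filter pvIsNum).map (fun o => ((PySem.Int.ofStrBase? o 16).getD 0, o)),
       b ++ offsets.filter (fun o => !pvIsNum o)) := by
  induction offsets generalizing a b with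
  | nil => simp
  | cons o t ih =>
    cases hs : PySem.Str.startswith o "0x" with
    | true =>
      cases hv : PySem.Int.ofStrBase? o 16 with
      | none => simp [hs, hv, ih, pvIsNum, -PySem.Str.startswith_eq]
      | some v => simp [hs, hv, ih, pvIsNum, -PySem.Str.startswith_eq]
    | false => simp [hs, ih, pvIsNum, -PySem.Str.startswith_eq]

-- sorted2 (a Python tuple key) IS sorted with the corresponding lexicographic-pair key.
lemma pvSorted2_eq_sorted_lex {α κ₁ κ₂ : Type} [LinearOrder κ₁] [LinearOrder κ₂]
    (xs : List α) (k1 : α → κ₁) (k2 : α → κ₂) :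
    PySem.List.sorted2 xs k1 k2 = PySem.List.sorted xs (fun x => toLex (k1 x, k2 x)) false := by
  have hcmp : (fun (a b : α) => decide (k1 a < k1 b) || (!decide (k1 b < k1 a) && decide (k2 a < k2 b)))
      = (fun (a b : α) => decide ((toLex (k1 a, k2 a) : Lex (κ₁ × κ₂)) < toLex (k1 b, k2 b))) := by
    funext a b
    rcases lt_trichotomy (k1 a) (k1 b) with h|h|h
    · simp [Prod.Lex.lt_iff, h]
    · simp [Prod.Lex.lt_iff, h]
    · simp [Prod.Lex.lt_iff, h, lt_asymm h]; intro he; exact absurd he (ne_of_gt h)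
  rw [PySem.List.sorted_eq_foldl_insertBy]
  show List.foldl (fun acc x => PySem.List.insertBy (fun a b => decide (k1 a < k1 b) || (!decide (k1 b < k1 a) && decide (k2 a < k2 b))) x acc) [] xs = _
  rw [hcmp]

lemma sort_offsets_eq (offsets : List String) :
    sort_offsets offsets = sort_offsets_alt offsets := by
  unfold sort_offsets sort_offsets_alt
  rw [pvPartition]
  dsimp only
  simp only [List.nil_append]
  rw [pvSorted2_eq_sorted_lex, pvSorted2_eq_sorted_lex]
  set num := (offsets.filter pvIsNum).map (fun o => ((PySem.Int.ofStrBase? o 16).getD 0, o)) with hnum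
  set sym := offsets.filter (fun o => !pvIsNum o) with hsym
  -- every element of num carries its own parse result
  have hnum_mem : ∀ p ∈ num, PySem.Str.startswith p.2 "0x" = true ∧
      PySem.Int.ofStrBase? p.2 16 = some p.1 := by
    intro p hp
    rw [hnum] at hp
    rcases List.mem_map.1 hp with ⟨o, ho, rfl⟩
    have hP : pvIsNum o = true := List.of_mem_filter ho
    rcases Bool.and_eq_true_iff.1 (by simpa [pvIsNum, -PySem.Str.startswith_eq] using hP) with ⟨h1, h2⟩
    rcases Option.isSome_iff_exists.1 h2 with ⟨v, hv⟩
    exact ⟨h1, by simp [hv]⟩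
  have hsym_mem : ∀ o ∈ sym, pvIsNum o = false := by
    intro o ho
    have := List.of_mem_filter (p := fun o => !pvIsNum o) ho
    simpa using this
  apply PySem.List.eq_of_perm_of_pairwise_le_of_injective
    (fun o => (toLex (pvTag o, o) : Lex (Lex (Int × Int) × String)))
    (fun a b h => congrArg (fun k : Lex (Lex (Int × Int) × String) => (ofLex k).2) h)
  · -- permutation: both sides rearrange offsets
    have h1 : ((PySem.List.sorted num (fun p => toLex (p.1, p.2)) false).map (fun p => p.2)).Perm
        (num.map (fun p => p.2)) :=
      (PySem.List.sorted_perm num (fun p => toLex (p.1, p.2)) false).map _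
    have h2 : num.map (fun p => p.2) = offsets.filter pvIsNum := by
      rw [hnum, List.map_map]; simp [Function.comp_def]
    have h3 : (PySem.List.sorted sym (fun x => x) false).Perm sym :=
      PySem.List.sorted_perm sym _ false
    have h4 : (offsets.filter pvIsNum ++ sym).Perm offsets := by
      rw [hsym]; exact List.filter_append_perm pvIsNum offsets
    have h5 : (PySem.List.sorted offsets (fun o => toLex (pvTag o, o)) false).Perm offsets :=
      PySem.List.sorted_perm offsets _ false
    exact (((h1.append h3).trans (by rw [h2])).trans h4).trans h5.symm
  · -- left side is sorted by the triple key
    rw [List.pairwise_append]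
    refine ⟨?_, ?_, ?_⟩
    · rw [List.pairwise_map]
      have hpw := PySem.List.sorted_pairwise num (fun p : Int × String => toLex (p.1, p.2))
      refine hpw.imp_of_mem ?_
      intro p q hp hq hle
      have hp' := hnum_mem p (((PySem.List.sorted_perm _ _ _).mem_iff).1 hp)
      have hq' := hnum_mem q (((PySem.List.sorted_perm _ _ _).mem_iff).1 hq)
      rw [pvTag_num hp'.1 hp'.2, pvTag_num hq'.1 hq'.2]
      rcases Prod.Lex.le_iff.1 hle with h | ⟨h1, h2⟩
      · exact Prod.Lex.le_iff.2 (Or.inl (Prod.Lex.lt_iff.2 (Or.inr ⟨rfl, h⟩)))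
      · exact Prod.Lex.le_iff.2 (Or.inr ⟨by simpa using congrArg (fun z => (toLex (0, z) : Lex (Int × Int))) h1, h2⟩)
    · have hpw := PySem.List.sorted_pairwise sym (fun x : String => x)
      refine hpw.imp_of_mem ?_
      intro a b ha hb hle
      have ha' := hsym_mem a (((PySem.List.sorted_perm _ _ _).mem_iff).1 ha)
      have hb' := hsym_mem b (((PySem.List.sorted_perm _ _ _).mem_iff).1 hb)
      rw [pvTag_sym ha', pvTag_sym hb']
      exact Prod.Lex.le_iff.2 (Or.inr ⟨rfl, hle⟩)
    · intro a ha b hb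
      rcases List.mem_map.1 ha with ⟨p, hp, rfl⟩
      have hp' := hnum_mem p (((PySem.List.sorted_perm _ _ _).mem_iff).1 hp)
      have hb' := hsym_mem b (((PySem.List.sorted_perm _ _ _).mem_iff).1 hb)
      rw [pvTag_num hp'.1 hp'.2, pvTag_sym hb']
      exact Prod.Lex.le_iff.2 (Or.inl (Prod.Lex.lt_iff.2 (Or.inl (by norm_num))))
  · exact PySem.List.sorted_pairwise offsets (fun o => toLex (pvTag o, o))

-- ===== VERDICT (by name: the statement is the Claim_ definition above) =====
theorem sort_offsets_spec : Claim_equal_sort_offsets := by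
  intro offsets _
  unfold Spec_sort_offsets
  exact sort_offsets_eq offsets
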